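-- pv_equiv track=rewrite | github.com/marcelo-lara/ai-light-song-v2 | src/analyzer/stages/patterns.py | _search_lengths
-- ===== SOURCE A (Python) =====
-- MIN_PATTERN_BARS = 2
--
-- PRIORITY_PATTERN_BARS = 4
--
-- MAX_PATTERN_BARS = 24
--
-- def _search_lengths(bar_count: int) -> list[int]:
--     max_window_length = min(MAX_PATTERN_BARS, bar_count)
--     search_lengths: list[int] = []
--     if max_window_length >= PRIORITY_PATTERN_BARS:
--         search_lengths.append(PRIORITY_PATTERN_BARS)
--     for window_length in range(max_window_length, MIN_PATTERN_BARS - 1, -1):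
--         if window_length != PRIORITY_PATTERN_BARS:
--             search_lengths.append(window_length)
--     return search_lengths
-- ===== SOURCE B (Python) =====
-- MIN_PATTERN_BARS = 2
--
-- PRIORITY_PATTERN_BARS = 4
--
-- MAX_PATTERN_BARS = 24
--
-- def _search_lengths(bar_count: int) -> list[int]:
--     candidates = range(MIN_PATTERN_BARS, min(MAX_PATTERN_BARS, bar_count) + 1)
--     return sorted(candidates, key=lambda w: (w != PRIORITY_PATTERN_BARS, -w))
-- ===== Notes on version B (the rewrite author's own statement) =====
-- stated objective: simpler
-- what changed: Replaces the conditional prepend plus a descending filtered loop with one ascending range and a single stable sort whose key (w != 4, -w) puts the priority length first and the rest in descending order.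
import Mathlib
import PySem

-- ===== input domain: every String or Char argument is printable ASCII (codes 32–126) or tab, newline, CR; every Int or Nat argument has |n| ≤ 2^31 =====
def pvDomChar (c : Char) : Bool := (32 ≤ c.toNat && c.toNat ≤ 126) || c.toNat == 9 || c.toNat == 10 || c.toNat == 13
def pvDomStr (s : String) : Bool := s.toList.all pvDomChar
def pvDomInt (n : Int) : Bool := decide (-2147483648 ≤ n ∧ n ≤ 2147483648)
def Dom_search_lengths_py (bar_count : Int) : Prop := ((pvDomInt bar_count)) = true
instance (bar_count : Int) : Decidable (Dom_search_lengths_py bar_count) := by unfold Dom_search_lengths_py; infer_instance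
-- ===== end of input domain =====

-- B replaces A's conditional prepend + descending filtered loop with one ascending range and a single stable sort keyed (w != 4, -w): simpler, same result.

-- ===== PORT A =====
def search_lengths_py (bar_count : Int) : List Int :=
  let max_window_length := min 24 bar_count
  let search_lengths : List Int := if max_window_length ≥ 4 then [4] else []
  (PySem.List.pyRange max_window_length (2 - 1) (-1)).foldl
    (fun acc w => if w ≠ 4 then acc ++ [w] else acc) search_lengths

-- ===== PORT B =====
def search_lengths_py_alt (bar_count : Int) : List Int :=
  let candidates := PySem.List.pyRange 2 (min 24 bar_count + 1) 1
  PySem.List.sorted2 candidates (fun w => if w ≠ 4 then (1 : Int) else 0) (fun w => -w) false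

-- ===== PRECONDITION & SPEC =====
def Spec_search_lengths_py (bar_count : Int) (out : List Int) : Prop := out = search_lengths_py_alt bar_count
instance (bar_count : Int) (out : List Int) : Decidable (Spec_search_lengths_py bar_count out) := by unfold Spec_search_lengths_py; infer_instance

-- ===== CLAIM (what is proved, stated in full; the proofs are below) =====
def Claim_equal_search_lengths_py : Prop := ∀ (bar_count : Int), Dom_search_lengths_py bar_count → Spec_search_lengths_py bar_count (search_lengths_py bar_count)

-- ===== LEMMAS AND PROOFS =====

-- Both ports depend on bar_count only through min 24 bar_count.
theorem pvA_congr (a b : Int) (h : min 24 a = min 24 b) :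
    search_lengths_py a = search_lengths_py b := by
  unfold search_lengths_py; rw [h]

theorem pvB_congr (a b : Int) (h : min 24 a = min 24 b) :
    search_lengths_py_alt a = search_lengths_py_alt b := by
  unfold search_lengths_py_alt; rw [h]

theorem pvA_nil (bar_count : Int) (h : bar_count ≤ 1) : search_lengths_py bar_count = [] := by
  have hle := min_le_right (24 : Int) bar_count
  have hm : min 24 bar_count ≤ 2 - 1 := by omega
  have h4 : ¬ (min 24 bar_count ≥ 4) := by omega
  simp only [search_lengths_py, PySem.List.pyRange_neg_one_eq_nil hm, List.foldl_nil]
  simp [h4]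

theorem pvB_nil (bar_count : Int) (h : bar_count ≤ 1) : search_lengths_py_alt bar_count = [] := by
  unfold search_lengths_py_alt
  have hm : min 24 bar_count + 1 ≤ 2 := by
    have := min_le_right 24 bar_count; omega
  rw [PySem.List.pyRange_one_eq_nil hm]
  rfl

-- ===== VERDICT (by name: the statement is the Claim_ definition above) =====
theorem search_lengths_py_spec : Claim_equal_search_lengths_py := by
  intro bar_count _
  unfold Spec_search_lengths_py
  by_cases hlo : bar_count ≤ 1
  · rw [pvA_nil _ hlo, pvB_nil _ hlo]
  · by_cases hhi : 24 ≤ bar_count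
    · have h : min 24 bar_count = min 24 (24 : Int) := by omega
      rw [pvA_congr _ 24 h, pvB_congr _ 24 h]
      decide
    · interval_cases bar_count <;> decide
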